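-- pv_equiv track=rewrite | github.com/minnseong/Algorithm | programmers/Test/Skt_Q1.py | solution
-- ===== SOURCE A (Python) =====
-- from collections import defaultdict
--
-- def solution(logs, events):
--     answer = []
--
--     users_history = defaultdict(list)
--
--     for log in logs:
--         t, user_name, event = log.split(" ")
--         users_history[user_name].append(event)
--
--     for k, v in users_history.items():
--         cnt = 0
--         for i in range(min(len(v), len(events))):
--             if v[i] == events[i]:
--                 cnt += 1
--             else:
--                 break
--         if cnt != min(len(v), len(events)):
--             answer.append(k)
--
--     if answer:
--         answer.sort()
--     else:
--         answer.append("-1")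
--     return answer
-- ===== SOURCE B (Python) =====
-- def solution(logs, events):
--     # Single pass: track each user's next event position and flag divergence on the fly;
--     # never builds per-user history lists.
--     pos = {}
--     diverged = set()
--     for log in logs:
--         t, user, event = log.split(" ")
--         i = pos.get(user, 0)
--         if i < len(events) and events[i] != event:
--             diverged.add(user)
--         pos[user] = i + 1
--     return sorted(diverged) if diverged else ["-1"]
-- ===== Notes on version B (the rewrite author's own statement) =====
-- stated objective: alternative
-- what changed: B replaces A's two-phase grouping (build a per-user history list, then re-scan each history against events) with a single fused pass over the logs keeping only a per-user position counter and a set of diverged users, never materialising history lists.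
import Mathlib
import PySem

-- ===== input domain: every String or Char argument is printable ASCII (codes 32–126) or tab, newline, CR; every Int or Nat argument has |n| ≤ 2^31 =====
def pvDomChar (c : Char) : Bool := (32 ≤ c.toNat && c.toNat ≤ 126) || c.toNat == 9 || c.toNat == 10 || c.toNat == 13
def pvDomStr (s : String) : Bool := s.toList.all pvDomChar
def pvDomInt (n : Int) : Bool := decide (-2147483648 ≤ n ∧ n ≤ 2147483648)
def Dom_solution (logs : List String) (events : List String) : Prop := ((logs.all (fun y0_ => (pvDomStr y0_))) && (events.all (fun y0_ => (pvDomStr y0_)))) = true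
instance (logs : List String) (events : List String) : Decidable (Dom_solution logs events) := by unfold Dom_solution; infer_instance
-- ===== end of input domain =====

-- B fuses A's two phases into one pass over the logs (a position counter per user and a set of
-- diverged users) and never builds per-user history lists; same return value, simpler flow.

-- ===== PORT A =====
-- inner loop 'for i in range(min(len(v), len(events))): if v[i] == events[i]: cnt += 1 else: break'
def forLoopA (events v : List String) (m i cnt : Nat) : Nat :=
  if i < m then
    if PySem.List.pyGetD v (i : Int) "" = PySem.List.pyGetD events (i : Int) "" then
      forLoopA events v m (i + 1) (cnt + 1)
    else cnt
  else cnt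
  termination_by m - i

def solution (logs : List String) (events : List String) : List String :=
  let usersHistory : PySem.Dict String (List String) :=
    logs.foldl (fun d log =>
      match PySem.Str.split? log " " with
      | some [_t, u, e] => d.modify u [] (fun v => v ++ [e])
      | _ => d) PySem.Dict.empty
  let answer : List String :=
    usersHistory.items.foldl (fun ans kv =>
      let m := min kv.2.length events.length
      let cnt := forLoopA events kv.2 m 0 0
      if cnt ≠ m then ans ++ [kv.1] else ans) []
  if answer ≠ [] then PySem.List.sorted answer (fun x => x)
  else answer ++ ["-1"]

-- ===== PORT B =====
def solution_alt (logs : List String) (events : List String) : List String :=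
  let st :=
    logs.foldl (fun (st : PySem.Dict String Int × PySem.Set String) log =>
      let parts := (PySem.Str.split? log " ").getD []
      -- 't, user, event = log.split(" ")': exactly three fields, else ValueError (outside Pre_)
      if parts.length = 3 then
        let u := parts.getD 1 ""
        let e := parts.getD 2 ""
        let i := st.1.getD u 0
        let dv := if i < PySem.List.len events ∧ PySem.List.pyGetD events i "" ≠ e
                  then PySem.Set.add st.2 u else st.2
        (st.1.insert u (i + 1), dv)
      else st) (PySem.Dict.empty, PySem.Set.empty)
  if st.2 = ([] : List String) then ["-1"]
  else PySem.List.sorted st.2 (fun x => x)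

-- ===== PRECONDITION & SPEC =====
-- Pre_ excludes exactly the logs on which A raises ValueError: a log entry that does not
-- split on " " into exactly three fields ('t user event').
def Pre_solution (logs : List String) (events : List String) : Prop :=
  ∀ log ∈ logs, ((PySem.Str.split? log " ").getD []).length = 3
instance (logs : List String) (events : List String) : Decidable (Pre_solution logs events) := by
  unfold Pre_solution; infer_instance
def pvWitness_solution : List String × List String := (["1 alice login", "2 bob login"], ["login"])

def Spec_solution (logs : List String) (events : List String) (out : List String) : Prop := out = solution_alt logs events
instance (logs : List String) (events : List String) (out : List String) : Decidable (Spec_solution logs events out) := by unfold Spec_solution; infer_instance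

-- ===== CLAIM (what is proved, stated in full; the proofs are below) =====
def Claim_equal_solution : Prop := ∀ (logs : List String) (events : List String), Dom_solution logs events → Pre_solution logs events → Spec_solution logs events (solution logs events)

-- ===== LEMMAS AND PROOFS =====

-- a user diverges iff its history mismatches the expected events somewhere before either runs out
def FlagV (events v : List String) : Prop :=
  ∃ j, j < min v.length events.length ∧ v.getD j "" ≠ events.getD j ""

def parseLog (log : String) : String × String :=
  match PySem.Str.split? log " " with
  | some [_t, u, e] => (u, e)
  | _ => ("", "")

def stepB (events : List String) (st : PySem.Dict String Int × PySem.Set String)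
    (p : String × String) : PySem.Dict String Int × PySem.Set String :=
  let i := st.1.getD p.1 0
  let dv := if i < PySem.List.len events ∧ PySem.List.pyGetD events i "" ≠ p.2
            then PySem.Set.add st.2 p.1 else st.2
  (st.1.insert p.1 (i + 1), dv)

lemma split3 (log : String) (h : ((PySem.Str.split? log " ").getD []).length = 3) :
    ∃ t u e, PySem.Str.split? log " " = some [t, u, e] := by
  cases hs : PySem.Str.split? log " " with
  | none => simp [hs] at h
  | some l =>
    rw [hs] at h
    simp only [Option.getD_some] at h
    obtain ⟨a, b, c, rfl⟩ := List.length_eq_three.mp h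
    exact ⟨a, b, c, rfl⟩

lemma foldA_eq (logs : List String) (d : PySem.Dict String (List String))
    (h : ∀ log ∈ logs, ((PySem.Str.split? log " ").getD []).length = 3) :
    logs.foldl (fun d log =>
      match PySem.Str.split? log " " with
      | some [_t, u, e] => d.modify u [] (fun v => v ++ [e])
      | _ => d) d
    = (logs.map parseLog).foldl (fun d p => d.modify p.1 [] (fun v => v ++ [p.2])) d := by
  induction logs generalizing d with
  | nil => rfl
  | cons log rest ih =>
    obtain ⟨t, u, e, hs⟩ := split3 log (h log (by simp))
    simp only [List.foldl_cons, List.map_cons, hs, parseLog]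
    exact ih _ (fun l hl => h l (by simp [hl]))

lemma foldB_eq (events : List String) (logs : List String)
    (st : PySem.Dict String Int × PySem.Set String)
    (h : ∀ log ∈ logs, ((PySem.Str.split? log " ").getD []).length = 3) :
    logs.foldl (fun st log =>
      let parts := (PySem.Str.split? log " ").getD []
      if parts.length = 3 then
        let u := parts.getD 1 ""
        let e := parts.getD 2 ""
        let i := st.1.getD u 0
        let dv := if i < PySem.List.len events ∧ PySem.List.pyGetD events i "" ≠ e
                  then PySem.Set.add st.2 u else st.2
        (st.1.insert u (i + 1), dv)
      else st) st
    = (logs.map parseLog).foldl (stepB events) st := by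
  induction logs generalizing st with
  | nil => rfl
  | cons log rest ih =>
    obtain ⟨t, u, e, hs⟩ := split3 log (h log (by simp))
    simp only [List.foldl_cons, List.map_cons, hs, parseLog, stepB]
    exact ih _ (fun l hl => h l (by simp [hl]))

lemma flag_append (events v : List String) (e : String) :
    FlagV events (v ++ [e]) ↔
    FlagV events v ∨ (v.length < events.length ∧ events.getD v.length "" ≠ e) := by
  unfold FlagV
  constructor
  · rintro ⟨j, hj, hne⟩
    simp only [List.length_append, List.length_singleton] at hj
    by_cases hlt : j < v.length
    · left
      refine ⟨j, by omega, ?_⟩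
      rwa [List.getD_append _ _ _ _ hlt] at hne
    · right
      have hje : j = v.length := by omega
      subst hje
      refine ⟨by omega, ?_⟩
      have : (v ++ [e]).getD v.length "" = e := by
        simp [List.getD_eq_getElem?_getD]
      rw [this] at hne
      exact Ne.symm hne
  · rintro (⟨j, hj, hne⟩ | ⟨hlt, hne⟩)
    · refine ⟨j, by simp; omega, ?_⟩
      rwa [List.getD_append _ _ _ _ (by omega)]
    · refine ⟨v.length, by simp; omega, ?_⟩
      have : (v ++ [e]).getD v.length "" = e := by
        simp [List.getD_eq_getElem?_getD]
      rw [this]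
      exact Ne.symm hne

lemma core (events : List String) (ps : List (String × String))
    (d : PySem.Dict String (List String)) (idx : PySem.Dict String Int) (dv : PySem.Set String)
    (h1 : ∀ u, idx.getD u 0 = ((d.getD u []).length : Int))
    (h2 : dv.Nodup)
    (h3 : ∀ u, u ∈ dv ↔ FlagV events (d.getD u [])) :
    (∀ u, (ps.foldl (stepB events) (idx, dv)).1.getD u 0
            = (((ps.foldl (fun d p => d.modify p.1 [] (fun v => v ++ [p.2])) d).getD u []).length : Int))
    ∧ (ps.foldl (stepB events) (idx, dv)).2.Nodup
    ∧ (∀ u, u ∈ (ps.foldl (stepB events) (idx, dv)).2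
          ↔ FlagV events ((ps.foldl (fun d p => d.modify p.1 [] (fun v => v ++ [p.2])) d).getD u [])) := by
  induction ps generalizing d idx dv with
  | nil => exact ⟨h1, h2, h3⟩
  | cons p rest ih =>
    obtain ⟨u, e⟩ := p
    simp only [List.foldl_cons]
    have hcond : (idx.getD u 0 < PySem.List.len events ∧ PySem.List.pyGetD events (idx.getD u 0) "" ≠ e)
        ↔ ((d.getD u []).length < events.length ∧ events.getD (d.getD u []).length "" ≠ e) := by
      rw [h1 u, PySem.List.len_eq]
      constructor <;> rintro ⟨ha, hb⟩ <;> refine ⟨by exact_mod_cast ha, ?_⟩ <;>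
        simpa [PySem.List.pyGetD_natCast] using hb
    have hstep : stepB events (idx, dv) (u, e)
        = (idx.insert u (idx.getD u 0 + 1),
           if (d.getD u []).length < events.length ∧ events.getD (d.getD u []).length "" ≠ e
           then PySem.Set.add dv u else dv) := by
      simp only [stepB]
      rw [if_congr hcond rfl rfl]
    rw [hstep]
    apply ih
    · intro u'
      rw [PySem.Dict.getD_insert, PySem.Dict.getD_modify]
      by_cases hu : u' = u
      · subst hu
        rw [if_pos rfl, if_pos rfl, h1 u']
        push_cast [List.length_append]
        simp
      · simp [hu, h1 u']
    · split_ifs with hc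
      · exact PySem.Set.nodup_add dv u h2
      · exact h2
    · intro u'
      rw [PySem.Dict.getD_modify]
      by_cases hu : u' = u
      · subst hu
        rw [if_pos rfl, flag_append]
        split_ifs with hc
        · rw [PySem.Set.mem_add]
          constructor
          · intro _
            exact Or.inr hc
          · intro _
            exact Or.inr rfl
        · rw [h3 u']
          constructor
          · exact Or.inl
          · rintro (h | h)
            · exact h
            · exact absurd h hc
      · rw [if_neg hu]
        split_ifs with hc
        · rw [PySem.Set.mem_add]
          simp [hu, h3 u']
        · exact h3 u'

lemma forLoopA_spec (events v : List String) (m : Nat) (i cnt : Nat) :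
    (forLoopA events v m i cnt ≠ cnt + (m - i))
      ↔ ∃ j, i ≤ j ∧ j < m ∧ v.getD j "" ≠ events.getD j "" := by
  generalize hk : m - i = k
  induction k generalizing i cnt with
  | zero =>
    have hmi : ¬ i < m := by omega
    rw [forLoopA]
    simp only [if_neg hmi, Nat.add_zero, ne_eq, not_true_eq_false, false_iff, not_exists]
    intro j hj
    omega
  | succ k ihk =>
    have hmi : i < m := by omega
    rw [forLoopA]
    simp only [if_pos hmi, PySem.List.pyGetD_natCast]
    by_cases heq : v.getD i "" = events.getD i ""
    · rw [if_pos heq, show cnt + (k + 1) = (cnt + 1) + k by omega,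
        ihk (i + 1) (cnt + 1) (by omega)]
      constructor
      · rintro ⟨j, hj1, hj2, hj3⟩
        exact ⟨j, by omega, hj2, hj3⟩
      · rintro ⟨j, hj1, hj2, hj3⟩
        refine ⟨j, ?_, hj2, hj3⟩
        rcases Nat.eq_or_lt_of_le hj1 with h | h
        · exact absurd heq (by rwa [h])
        · omega
    · rw [if_neg heq]
      constructor
      · intro _
        exact ⟨i, le_refl i, hmi, heq⟩
      · intro _
        omega

lemma flag_iff (events v : List String) :
    (forLoopA events v (min v.length events.length) 0 0 ≠ min v.length events.length)
      ↔ FlagV events v := by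
  simpa [FlagV] using forLoopA_spec events v (min v.length events.length) 0 0

lemma answer_eq (events : List String) (items : List (String × List String)) (acc : List String) :
    items.foldl (fun ans kv =>
      if forLoopA events kv.2 (min kv.2.length events.length) 0 0 ≠ min kv.2.length events.length
      then ans ++ [kv.1] else ans) acc
    = acc ++ (items.filter (fun kv =>
        decide (forLoopA events kv.2 (min kv.2.length events.length) 0 0
          ≠ min kv.2.length events.length))).map Prod.fst := by
  have h := PySem.List.foldl_append_if
    (fun kv : String × List String =>
      decide (forLoopA events kv.2 (min kv.2.length events.length) 0 0
        ≠ min kv.2.length events.length))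
    Prod.fst items acc
  simpa using h

-- ===== VERDICT (by name: the statement is the Claim_ definition above) =====
theorem solution_spec : Claim_equal_solution := by
  unfold Claim_equal_solution
  intro logs events _hdom hpre
  unfold Spec_solution
  simp only [solution, solution_alt]
  rw [foldA_eq logs PySem.Dict.empty hpre, foldB_eq events logs _ hpre, answer_eq]
  obtain ⟨h1, h2, h3⟩ := core events (logs.map parseLog) PySem.Dict.empty PySem.Dict.empty
      PySem.Set.empty
      (by intro u; simp [PySem.Dict.getD_empty])
      (by simp [PySem.Set.empty])
      (by intro u; simp [PySem.Set.empty, PySem.Dict.getD_empty, FlagV])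
  set ps := logs.map parseLog with hps
  set hist := ps.foldl (fun d p => d.modify p.1 [] (fun v => v ++ [p.2])) PySem.Dict.empty with hhist
  set dv := (ps.foldl (stepB events) (PySem.Dict.empty, PySem.Set.empty)).2 with hdv
  set ansA := (hist.items.filter (fun kv =>
      decide (forLoopA events kv.2 (min kv.2.length events.length) 0 0
        ≠ min kv.2.length events.length))).map Prod.fst with hansA
  have hnodupK : hist.keys.Nodup := by
    rw [hhist]
    exact PySem.Dict.nodup_keys_foldl_modify_key ps Prod.fst [] (fun _ p v => v ++ [p.2])
      PySem.Dict.empty (by simp)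
  have hnodupA : ansA.Nodup := by
    have hsub : ansA.Sublist hist.keys :=
      List.Sublist.map Prod.fst List.filter_sublist
    exact hnodupK.sublist hsub
  have hmem : ∀ k, k ∈ ansA ↔ FlagV events (hist.getD k []) := by
    intro k
    rw [hansA]
    simp only [List.mem_map, List.mem_filter, decide_eq_true_eq]
    constructor
    · rintro ⟨⟨k', v⟩, ⟨hin, hf⟩, rfl⟩
      rw [flag_iff] at hf
      rwa [PySem.Dict.getD_of_mem_items hist hin hnodupK]
    · intro hf
      have hne : hist.getD k [] ≠ [] := by
        intro h0
        rw [h0] at hf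
        obtain ⟨j, hj, _⟩ := hf
        simp at hj
      have hcont : hist.contains k = true := by
        by_contra hc
        exact hne (PySem.Dict.getD_of_not_contains hist [] (by simpa using hc))
      obtain ⟨v, hv⟩ := Option.isSome_iff_exists.mp (by
        rw [← PySem.Dict.contains_eq_isSome_get? hist k]; exact hcont)
      refine ⟨(k, v), ⟨PySem.Dict.mem_items_of_get?_eq_some hist hv, ?_⟩, rfl⟩
      rw [flag_iff]
      rwa [PySem.Dict.getD_of_get?_eq_some hist [] hv] at hf
  have hperm : ansA.Perm dv :=
    (List.perm_ext_iff_of_nodup hnodupA h2).mpr (fun a => by rw [hmem a, h3 a])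
  simp only [List.nil_append]
  by_cases hd : dv = ([] : List String)
  · have ha : ansA = [] := by
      rw [hd] at hperm
      exact hperm.eq_nil
    simp [hd, ha]
  · have ha : ansA ≠ [] := by
      intro h0
      rw [h0] at hperm
      exact hd hperm.symm.eq_nil
    simp only [if_neg hd, if_pos ha]
    exact PySem.List.sorted_eq_sorted_of_perm ansA dv (fun x => x) (fun a b h => h) hperm
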